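-- pv_equiv track=rewrite | github.com/Deepak-Work/Foreign_Whispers | Code/text_module.py | n_consecutive_word
-- ===== SOURCE A (Python) =====
-- from itertools import groupby
--
-- def all_equal(iterable):
--     iterable = [_.lower() for _ in iterable if _ not in [',','.',' ']]
--     g = groupby(iterable)
--     return next(g, True) and not next(g, False)
--
-- def n_consecutive_word(line, n = 6):
--     '''Translation models seems to have a bug. When the input sentence is a proper noun, they tend to output a very long sentence with the same word.
--     This function is a workaround that bug.'''
--     new_line, ctr = [],0
--     while ctr<len(line):
--         if not all_equal(line[ctr:ctr+n]):
--             new_line+=line[ctr:ctr+1]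
--         ctr+=1
--     new_line+=[line[-1]]
--     return new_line
-- ===== SOURCE B (Python) =====
-- def n_consecutive_word(line, n=6):
--     '''One right-to-left pass precomputes, for every start index i, the position of the
--     first "change" (adjacent non-punctuation words, lowercased, that differ) whose left
--     word is at index >= i; each window test is then a single O(1) comparison.'''
--     L = len(line)
--     low = [None if w in (',', '.', ' ') else w.lower() for w in line]
--     INF = L + 1
--     first_bad = [INF] * (L + 1)   # first_bad[i]: least j such that some change pair (p, j) has p >= i
--     nxt_kept = L                  # least non-punctuation index > current i (L = none)
--     for i in range(L - 1, -1, -1):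
--         first_bad[i] = first_bad[i + 1]
--         if low[i] is not None:
--             if nxt_kept < L and low[nxt_kept] != low[i]:
--                 first_bad[i] = min(nxt_kept, first_bad[i])
--             nxt_kept = i
--     out = []
--     for i in range(L):
--         stop = i + n                       # Python slice end of line[i:i+n]
--         e = stop if stop >= 0 else L + stop
--         if e > L:
--             e = L
--         if first_bad[i] < e:
--             out.append(line[i])
--     out.append(line[-1])
--     return out
-- ===== Notes on version B (the rewrite author's own statement) =====
-- stated objective: faster
-- what changed: A re-filters, lowercases and groups every length-n window (O(L*n) work); B makes one right-to-left pass precomputing, for each start index i, the position of the first differing adjacent pair of non-punctuation lowercased words whose left member is at index >= i, so each window test becomes a single O(1) comparison.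
-- outside the precondition, e.g. on n_consecutive_word([], 6): A raises IndexError, B raises IndexError
import Mathlib
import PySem

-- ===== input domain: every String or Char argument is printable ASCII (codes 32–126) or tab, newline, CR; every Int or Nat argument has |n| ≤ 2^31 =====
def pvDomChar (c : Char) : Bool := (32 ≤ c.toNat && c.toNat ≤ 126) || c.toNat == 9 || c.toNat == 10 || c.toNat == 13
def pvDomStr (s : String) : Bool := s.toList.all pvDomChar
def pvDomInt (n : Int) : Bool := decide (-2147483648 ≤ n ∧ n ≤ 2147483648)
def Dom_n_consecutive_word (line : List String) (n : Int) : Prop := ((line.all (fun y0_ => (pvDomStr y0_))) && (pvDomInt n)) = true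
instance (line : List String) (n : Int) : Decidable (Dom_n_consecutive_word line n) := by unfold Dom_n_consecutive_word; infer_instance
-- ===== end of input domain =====

-- B replaces A's per-window filter+groupby scan by one right-to-left precomputation of the
-- first "change" position reachable from each index, making every window test O(1) (objective: faster).


-- ===== PORT A =====
def pvPunct : List String := [",", ".", " "]

-- itertools.groupby count: number of maximal runs of consecutive equal elements
def pvNumGroups (xs : List String) : Nat :=
  match xs with
  | [] => 0
  | x :: r => (r.foldl (fun (st : Nat × String) y => if y = st.2 then st else (st.1 + 1, y)) (1, x)).1

-- all_equal: filter punctuation, lowercase, then 'next(g, True) and not next(g, False)' = at most one group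
def pvAllEqual (l : List String) : Bool :=
  decide (pvNumGroups ((l.filter (fun s => !(pvPunct.contains s))).map PySem.Str.lower) ≤ 1)

def n_consecutive_word (line : List String) (n : Int) : List String :=
  ((List.range line.length).foldl (fun (acc : List String) (ctr : Nat) =>
      if pvAllEqual (PySem.List.slice line (some (ctr : Int)) (some ((ctr : Int) + n))) = false then
        acc ++ PySem.List.slice line (some (ctr : Int)) (some ((ctr : Int) + 1))
      else acc) [])
  ++ (PySem.List.pyGet? line (-1)).toList   -- new_line += [line[-1]]; Pre_ excludes the IndexError case

-- ===== PORT B =====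
def n_consecutive_word_alt (line : List String) (n : Int) : List String :=
  let L := line.length
  let low : List (Option String) := line.map (fun w => if w ∈ pvPunct then none else some (PySem.Str.lower w))
  let inf := L + 1
  -- for i in range(L-1, -1, -1): first_bad[i] = …; nxt_kept = …
  let st := (List.range L).foldl (fun (st : List Nat × Nat) k =>
      let i := L - 1 - k
      let fb := st.1.set i (st.1.getD (i + 1) inf)
      match low.getD i none with
      | none => (fb, st.2)
      | some v =>
          if st.2 < L ∧ low.getD st.2 none ≠ some v then
            (fb.set i (min st.2 (fb.getD i inf)), i)
          else (fb, i)) (List.replicate (L + 1) inf, L)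
  ((List.range L).foldl (fun (out : List String) (i : Nat) =>
      let stop : Int := (i : Int) + n
      let e : Int := if 0 ≤ stop then stop else (L : Int) + stop
      let e : Int := if (L : Int) < e then (L : Int) else e
      if ((st.1.getD i inf : Nat) : Int) < e then out ++ [line.getD i ""] else out) [])
  ++ (PySem.List.pyGet? line (-1)).toList   -- out.append(line[-1])

-- ===== PRECONDITION & SPEC =====
-- Python A raises IndexError on line == [] (line[-1]); that is the only failing input.
def Pre_n_consecutive_word (line : List String) (n : Int) : Prop := line ≠ []
instance (line : List String) (n : Int) : Decidable (Pre_n_consecutive_word line n) := by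
  unfold Pre_n_consecutive_word; infer_instance

def pvWitness_n_consecutive_word : List String × Int := (["hello", "hello", ",", "world"], 2)

def Spec_n_consecutive_word (line : List String) (n : Int) (out : List String) : Prop := out = n_consecutive_word_alt line n
instance (line : List String) (n : Int) (out : List String) : Decidable (Spec_n_consecutive_word line n out) := by unfold Spec_n_consecutive_word; infer_instance

-- ===== CLAIM (what is proved, stated in full; the proofs are below) =====
def Claim_equal_n_consecutive_word : Prop := ∀ (line : List String) (n : Int), Dom_n_consecutive_word line n → Pre_n_consecutive_word line n → Spec_n_consecutive_word line n (n_consecutive_word line n)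

-- ===== LEMMAS AND PROOFS =====

-- normalisation A applies to each word: drop punctuation, lowercase the rest
def pvNorm (w : String) : Option String := if w ∈ pvPunct then none else some (PySem.Str.lower w)

-- number of value changes along a run started at x
def pvChg : String → List String → Nat
  | _, [] => 0
  | x, y :: ys => (if y = x then 0 else 1) + pvChg y ys

-- mathematical model of B's right-to-left loop: pvFBN los k = (first_bad value written at
-- index L-k, nxt_kept after processing indices L-k … L-1)
def pvFBN (los : List (Option String)) : Nat → Nat × Nat
  | 0 => (los.length + 1, los.length)
  | (k+1) =>
      let L := los.length
      let i := L - (k+1)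
      let p := pvFBN los k
      match los.getD i none with
      | none => p
      | some v => (if p.2 < L ∧ los.getD p.2 none ≠ some v then min p.2 p.1 else p.1, i)

-- "window [i, e) contains two kept positions with different values"
def pvHasChange (los : List (Option String)) (i e : Nat) : Prop :=
  ∃ p j, i ≤ p ∧ p < j ∧ j < e ∧ los.getD p none ≠ none ∧ los.getD j none ≠ none ∧
    los.getD p none ≠ los.getD j none

theorem pvFoldGroups (r : List String) (c : Nat) (x : String) :
    (r.foldl (fun (st : Nat × String) y => if y = st.2 then st else (st.1 + 1, y)) (c, x)).1
      = c + pvChg x r := by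
  induction r generalizing c x with
  | nil => simp [pvChg]
  | cons y ys ih => by_cases h : y = x <;> simp [pvChg, h, ih] <;> omega

theorem pvChg_eq_zero (x : String) (r : List String) :
    pvChg x r = 0 ↔ ∀ a ∈ r, a = x := by
  induction r generalizing x with
  | nil => simp [pvChg]
  | cons y ys ih =>
    by_cases h : y = x
    · subst h; simp [pvChg, ih]
    · constructor
      · intro h0; exact absurd h0 (by simp [pvChg, h])
      · intro hall; exact absurd (hall y List.mem_cons_self) h

theorem pvNumGroups_le_one (xs : List String) :
    pvNumGroups xs ≤ 1 ↔ ∀ a ∈ xs, ∀ b ∈ xs, a = b := by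
  cases xs with
  | nil => simp [pvNumGroups]
  | cons x r =>
    rw [pvNumGroups, pvFoldGroups]
    constructor
    · intro h a ha b hb
      have hz : ∀ a ∈ r, a = x := (pvChg_eq_zero x r).mp (by omega)
      rcases List.mem_cons.mp ha with h1 | h1 <;> rcases List.mem_cons.mp hb with h2 | h2
      · rw [h1, h2]
      · rw [h1]; exact (hz b h2).symm
      · rw [h2]; exact hz a h1
      · exact (hz a h1).trans (hz b h2).symm
    · intro h
      have : pvChg x r = 0 := (pvChg_eq_zero x r).mpr
        (fun a ha => h a (List.mem_cons_of_mem _ ha) x (List.mem_cons_self))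
      omega

theorem pvFilterMap (l : List String) :
    (l.filter (fun s => !(pvPunct.contains s))).map PySem.Str.lower = (l.map pvNorm).reduceOption := by
  induction l with
  | nil => rfl
  | cons w ws ih =>
    by_cases h : w ∈ pvPunct
    · simpa [pvNorm, h, List.filter_cons] using ih
    · simpa [pvNorm, h, List.filter_cons] using ih

theorem pvMemSeg (los : List (Option String)) (i t : Nat) (v : String) :
    v ∈ ((los.drop i).take t).reduceOption ↔
      ∃ q, i ≤ q ∧ q < i + t ∧ los.getD q none = some v := by
  rw [List.reduceOption_mem_iff, List.mem_iff_getElem?]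
  constructor
  · rintro ⟨q, hq⟩
    rw [List.getElem?_take] at hq
    split at hq
    · rw [List.getElem?_drop] at hq
      refine ⟨i + q, by omega, by omega, ?_⟩
      simp [List.getD_eq_getElem?_getD, hq]
    · exact absurd hq (by simp)
  · rintro ⟨q, hiq, hqt, hv⟩
    have hq : los[q]? = some (some v) := by
      rw [List.getD_eq_getElem?_getD] at hv
      cases h : los[q]? with
      | none => simp [h] at hv
      | some o => rw [h] at hv; simp at hv; simp [hv]
    refine ⟨q - i, ?_⟩
    rw [List.getElem?_take]
    have : q - i < t := by omega
    simp only [this, if_pos]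
    rw [List.getElem?_drop]
    rwa [Nat.add_sub_cancel' hiq]

theorem pvHasChange_iff (los : List (Option String)) (i e : Nat) :
    pvHasChange los i e ↔
      ¬ (∀ a ∈ ((los.drop i).take (e - i)).reduceOption,
          ∀ b ∈ ((los.drop i).take (e - i)).reduceOption, a = b) := by
  constructor
  · rintro ⟨p, j, hip, hpj, hje, hp, hj, hne⟩
    intro hall
    obtain ⟨a, ha⟩ := Option.ne_none_iff_exists'.mp hp
    obtain ⟨b, hb⟩ := Option.ne_none_iff_exists'.mp hj
    have hma := (pvMemSeg los i (e - i) a).mpr ⟨p, hip, by omega, ha⟩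
    have hmb := (pvMemSeg los i (e - i) b).mpr ⟨j, by omega, by omega, hb⟩
    exact hne (by rw [ha, hb, hall a hma b hmb])
  · intro h
    by_contra hnc
    apply h
    intro a ha b hb
    obtain ⟨p, hip, hpe, hpv⟩ := (pvMemSeg los i (e - i) a).mp ha
    obtain ⟨q, hiq, hqe, hqv⟩ := (pvMemSeg los i (e - i) b).mp hb
    by_contra hab
    apply hnc
    rcases Nat.lt_trichotomy p q with h1 | h1 | h1
    · exact ⟨p, q, hip, h1, by omega, by rw [hpv]; simp, by rw [hqv]; simp,
        by rw [hpv, hqv]; exact fun hh => hab (Option.some.inj hh)⟩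
    · subst h1; rw [hpv] at hqv; exact absurd (Option.some.inj hqv) hab
    · exact ⟨q, p, hiq, h1, by omega, by rw [hqv]; simp, by rw [hpv]; simp,
        by rw [hqv, hpv]; exact fun hh => hab (Option.some.inj hh).symm⟩

theorem pvFBN_spec (los : List (Option String)) (k : Nat) (hk : k ≤ los.length) :
    (los.length - k ≤ (pvFBN los k).2 ∧ (pvFBN los k).2 ≤ los.length ∧
     (∀ q, los.length - k ≤ q → q < (pvFBN los k).2 → los.getD q none = none) ∧
     ((pvFBN los k).2 < los.length → los.getD (pvFBN los k).2 none ≠ none)) ∧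
    (∀ e, e ≤ los.length → ((pvFBN los k).1 < e ↔ pvHasChange los (los.length - k) e)) := by
  induction k with
  | zero =>
    have e1 : (pvFBN los 0).1 = los.length + 1 := rfl
    have e2 : (pvFBN los 0).2 = los.length := rfl
    refine ⟨⟨by omega, by omega, fun q h1 h2 => absurd h2 (by omega),
      fun h => absurd h (by omega)⟩, fun e he => ?_⟩
    constructor
    · intro h; exact absurd h (by omega)
    · rintro ⟨p, j, hip, hpj, hje, -⟩; omega
  | succ k ih =>
    have hk' : k ≤ los.length := by omega
    obtain ⟨⟨hm1, hm2, hm3, hm4⟩, hF⟩ := ih hk'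
    set i := los.length - (k + 1) with hidef
    have hi : i < los.length := by omega
    have hi1 : i + 1 = los.length - k := by omega
    rw [← hi1] at hF hm3 hm1
    have hup : ∀ e, pvHasChange los (i + 1) e → pvHasChange los i e := by
      rintro e ⟨p, j, hip, h2, h3, h4, h5, h6⟩
      exact ⟨p, j, by omega, h2, h3, h4, h5, h6⟩
    cases hdi : los.getD i none with
    | none =>
      have hfst : (pvFBN los (k + 1)).1 = (pvFBN los k).1 := by
        simp only [pvFBN]; rw [← hidef, hdi]
      have hsnd : (pvFBN los (k + 1)).2 = (pvFBN los k).2 := by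
        simp only [pvFBN]; rw [← hidef, hdi]
      refine ⟨⟨by omega, by omega, ?_, fun h => by rw [hsnd]; exact hm4 (by omega)⟩,
        fun e he => ?_⟩
      · intro q h1 h2
        rw [hsnd] at h2
        rcases Nat.eq_or_lt_of_le h1 with h | h
        · rw [← h]; exact hdi
        · exact hm3 q (by omega) h2
      · rw [hfst, hF e he]
        constructor
        · exact hup e
        · rintro ⟨p, j, hip, h2, h3, h4, h5, h6⟩
          have hpi : p ≠ i := fun hpe => h4 (hpe ▸ hdi)
          exact ⟨p, j, by omega, h2, h3, h4, h5, h6⟩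
    | some v =>
      have hfst : (pvFBN los (k + 1)).1 =
          (if (pvFBN los k).2 < los.length ∧ los.getD (pvFBN los k).2 none ≠ some v
            then min (pvFBN los k).2 (pvFBN los k).1 else (pvFBN los k).1) := by
        simp only [pvFBN]; rw [← hidef, hdi]
      have hsnd : (pvFBN los (k + 1)).2 = i := by
        simp only [pvFBN]; rw [← hidef, hdi]
      have hjm : ∀ j, i + 1 ≤ j → los.getD j none ≠ none → (pvFBN los k).2 ≤ j := by
        intro j h1 h2
        by_contra h3
        exact h2 (hm3 j h1 (by omega))
      refine ⟨⟨by omega, by omega, fun q h1 h2 => absurd h2 (by rw [hsnd]; omega),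
        fun _ => by rw [hsnd, hdi]; simp⟩, fun e he => ?_⟩
      rw [hfst]
      split_ifs with hc
      · constructor
        · intro hlt
          rcases Nat.lt_or_ge (pvFBN los k).2 e with hme | hme
          · exact ⟨i, (pvFBN los k).2, le_refl i, by omega, hme, by rw [hdi]; simp,
              hm4 (by omega), by rw [hdi]; exact fun hh => hc.2 hh.symm⟩
          · exact hup e ((hF e he).mp (by omega))
        · rintro ⟨p, j, hip, h2, h3, h4, h5, h6⟩
          rcases Nat.eq_or_lt_of_le hip with hpe | hpe
          · have := hjm j (by omega) h5
            omega
          · have : (pvFBN los k).1 < e := (hF e he).mpr ⟨p, j, by omega, h2, h3, h4, h5, h6⟩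
            omega
      · constructor
        · intro hlt; exact hup e ((hF e he).mp hlt)
        · rintro ⟨p, j, hip, h2, h3, h4, h5, h6⟩
          refine (hF e he).mpr ?_
          rcases Nat.eq_or_lt_of_le hip with hpe | hpe
          · have hji : i + 1 ≤ j := by omega
            have hmj : (pvFBN los k).2 ≤ j := hjm j hji h5
            have hmL : (pvFBN los k).2 < los.length := by omega
            have hmv : los.getD (pvFBN los k).2 none = some v := by
              by_contra hne; exact hc ⟨hmL, hne⟩
            have hpv : los.getD p none = some v := by rw [← hpe]; exact hdi
            have hmj' : (pvFBN los k).2 < j := by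
              rcases Nat.eq_or_lt_of_le hmj with h | h
              · exfalso; apply h6; rw [hpv, ← h, hmv]
              · exact h
            exact ⟨(pvFBN los k).2, j, by omega, hmj', h3, by rw [hmv]; simp, h5,
              by rw [hmv, ← hpv]; exact h6⟩
          · exact ⟨p, j, by omega, h2, h3, h4, h5, h6⟩

theorem pvSetMapRange (f g : Nat → Nat) (m i v : Nat) (_hi : i < m)
    (hg : ∀ j, j < m → (if j = i then v else f j) = g j) :
    ((List.range m).map f).set i v = (List.range m).map g := by
  apply List.ext_getElem
  · simp
  · intro j h1 h2
    simp only [List.length_set, List.length_map, List.length_range] at h1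
    rw [List.getElem_set]
    simp only [List.getElem_map, List.getElem_range]
    rw [← hg j h1]
    split_ifs with h3 h4 h4
    · rfl
    · omega
    · omega
    · rfl

def pvStepB (los : List (Option String)) (L : Nat) (st : List Nat × Nat) (k' : Nat) :
    List Nat × Nat :=
  let i := L - 1 - k'
  let fb := st.1.set i (st.1.getD (i + 1) (L + 1))
  match los.getD i none with
  | none => (fb, st.2)
  | some v =>
      if st.2 < L ∧ los.getD st.2 none ≠ some v then
        (fb.set i (min st.2 (fb.getD i (L + 1))), i)
      else (fb, i)

theorem pvFold_spec (los : List (Option String)) (L : Nat) (hL : los.length = L)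
    (k : Nat) (hk : k ≤ L) :
    ((List.range k).foldl (pvStepB los L) (List.replicate (L + 1) (L + 1), L)) =
      (((List.range (L + 1)).map (fun j =>
          if L - k ≤ j then (pvFBN los (L - j)).1 else L + 1)),
       (pvFBN los k).2) := by
  subst hL
  induction k with
  | zero =>
    simp only [List.range_zero, List.foldl_nil, pvFBN]
    refine Prod.ext ?_ rfl
    apply List.ext_getElem
    · simp
    · intro j h1 h2
      simp only [List.length_replicate] at h1
      simp only [List.getElem_replicate, List.getElem_map, List.getElem_range]
      split_ifs with h
      · have hz : los.length - j = 0 := by omega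
        rw [hz, pvFBN]
      · rfl
  | succ k ih =>
    have hk' : k ≤ los.length := by omega
    rw [List.range_succ, List.foldl_append, ih hk', List.foldl_cons, List.foldl_nil]
    simp only [pvStepB]
    set i := los.length - 1 - k with hidef
    have hi : i < los.length := by omega
    have hiL : los.length - (k + 1) = i := by omega
    have hgd : ((List.range (los.length + 1)).map (fun j =>
        if los.length - k ≤ j then (pvFBN los (los.length - j)).1 else los.length + 1)).getD
          (i + 1) (los.length + 1) = (pvFBN los k).1 := by
      have hx : los.length - (i + 1) = k := by omega
      rw [PySem.List.getD_map_range _ _ _ _ (by omega), if_pos (by omega), hx]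
    rw [hgd]
    have hset : ((List.range (los.length + 1)).map (fun j =>
        if los.length - k ≤ j then (pvFBN los (los.length - j)).1 else los.length + 1)).set
          i ((pvFBN los k).1) = (List.range (los.length + 1)).map (fun j =>
          if los.length - k ≤ j then (pvFBN los (los.length - j)).1
          else if j = i then (pvFBN los k).1 else los.length + 1) := by
      apply pvSetMapRange _ _ _ _ _ (by omega)
      intro j hj
      by_cases h1 : j = i
      · subst h1
        rw [if_pos rfl, if_neg (by omega), if_pos rfl]
      · rw [if_neg h1]
        by_cases h2 : los.length - k ≤ j
        · rw [if_pos h2, if_pos h2]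
        · rw [if_neg h2, if_neg h2, if_neg h1]
    rw [hset]
    have hfin : ∀ (w : Nat), w = (pvFBN los (k + 1)).1 →
        (List.range (los.length + 1)).map (fun j =>
            if los.length - k ≤ j then (pvFBN los (los.length - j)).1
            else if j = i then w else los.length + 1)
        = (List.range (los.length + 1)).map (fun j =>
            if los.length - (k + 1) ≤ j then (pvFBN los (los.length - j)).1
            else los.length + 1) := by
      intro w hw
      apply List.map_congr_left
      intro j hj
      simp only [List.mem_range] at hj
      by_cases h1 : los.length - k ≤ j
      · rw [if_pos h1, if_pos (by omega)]
      · rw [if_neg h1]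
        by_cases h2 : j = i
        · subst h2
          rw [if_pos rfl, if_pos (by omega)]
          have hji : los.length - i = k + 1 := by omega
          rw [hji, hw]
        · rw [if_neg h2, if_neg (by omega)]
    split
    next hdi =>
      have hfst : (pvFBN los (k + 1)).1 = (pvFBN los k).1 := by
        simp only [pvFBN]; rw [hiL, hdi]
      have hsnd : (pvFBN los (k + 1)).2 = (pvFBN los k).2 := by
        simp only [pvFBN]; rw [hiL, hdi]
      exact Prod.ext (hfin _ hfst.symm) hsnd.symm
    next v hdi =>
      have hfst : (pvFBN los (k + 1)).1 =
          (if (pvFBN los k).2 < los.length ∧ los.getD (pvFBN los k).2 none ≠ some v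
            then min (pvFBN los k).2 (pvFBN los k).1 else (pvFBN los k).1) := by
        simp only [pvFBN]; rw [hiL, hdi]
      have hsnd : (pvFBN los (k + 1)).2 = i := by
        simp only [pvFBN]; rw [hiL, hdi]
      have hgdi : ((List.range (los.length + 1)).map (fun j =>
            if los.length - k ≤ j then (pvFBN los (los.length - j)).1
            else if j = i then (pvFBN los k).1 else los.length + 1)).getD i (los.length + 1)
          = (pvFBN los k).1 := by
        rw [PySem.List.getD_map_range _ _ _ _ (by omega)]
        rw [if_neg (by omega), if_pos rfl]
      have hcommon : ∀ (w : Nat),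
          ((List.range (los.length + 1)).map (fun j =>
            if los.length - k ≤ j then (pvFBN los (los.length - j)).1
            else if j = i then (pvFBN los k).1 else los.length + 1)).set i w
          = (List.range (los.length + 1)).map (fun j =>
              if los.length - k ≤ j then (pvFBN los (los.length - j)).1
              else if j = i then w else los.length + 1) := by
        intro w
        apply pvSetMapRange _ _ _ _ _ (by omega)
        intro j hj
        by_cases h1 : j = i
        · subst h1
          rw [if_pos rfl, if_neg (by omega), if_pos rfl]
        · rw [if_neg h1]
          by_cases h2 : los.length - k ≤ j
          · rw [if_pos h2, if_pos h2]
          · rw [if_neg h2, if_neg h2, if_neg h1, if_neg h1]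
      split_ifs with hc
      · refine Prod.ext ?_ hsnd.symm
        simp only
        rw [hgdi, hcommon]
        exact hfin _ (by rw [hfst, if_pos hc])
      · refine Prod.ext ?_ hsnd.symm
        simp only
        exact hfin _ (by rw [hfst, if_neg hc])

theorem pvSlice_eq (line : List String) (i : Nat) (b : Int) (hi : i < line.length) :
    PySem.List.slice line (some (i : Int)) (some b)
      = (line.drop i).take (PySem.List.clampIdx line.length b - i) := by
  simp only [PySem.List.slice]
  rw [PySem.List.clampIdx_natCast, Nat.min_eq_left (le_of_lt hi)]

theorem pvClampCmp (L fb : Nat) (x : Int) :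
    (fb < PySem.List.clampIdx L x) ↔ ((fb : Int) <
      (if (L : Int) < (if 0 ≤ x then x else (L : Int) + x) then (L : Int)
       else (if 0 ≤ x then x else (L : Int) + x))) := by
  simp only [PySem.List.clampIdx, Nat.min_def]
  split_ifs <;> omega

theorem pvTakeOne (line : List String) (i : Nat) (hi : i < line.length) :
    PySem.List.slice line (some (i : Int)) (some ((i : Int) + 1)) = [line.getD i ""] := by
  rw [show ((i : Int) + 1) = ((i + 1 : Nat) : Int) by push_cast; ring]
  rw [PySem.List.slice_natCast]
  rw [show i + 1 - i = 1 by omega]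
  rw [List.drop_eq_getElem_cons hi]
  rw [List.getD_eq_getElem?_getD, List.getElem?_eq_getElem hi]
  rfl

theorem pvCond (line : List String) (n : Int) (ctr : Nat) (h : ctr < line.length) :
    (pvAllEqual (PySem.List.slice line (some (ctr : Int)) (some ((ctr : Int) + n))) = false)
    ↔ (((pvFBN (line.map pvNorm) (line.length - ctr)).1 : Int) <
        (if (line.length : Int) < (if 0 ≤ (ctr : Int) + n then (ctr : Int) + n
            else (line.length : Int) + ((ctr : Int) + n)) then (line.length : Int)
         else (if 0 ≤ (ctr : Int) + n then (ctr : Int) + n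
            else (line.length : Int) + ((ctr : Int) + n)))) := by
  have hlen : (line.map pvNorm).length = line.length := by simp
  rw [pvSlice_eq line ctr ((ctr : Int) + n) h]
  rw [pvAllEqual, decide_eq_false_iff_not, pvNumGroups_le_one, pvFilterMap]
  rw [List.map_take, List.map_drop]
  rw [← pvHasChange_iff]
  have hk : line.length - ctr ≤ (line.map pvNorm).length := by omega
  have hFB := (pvFBN_spec (line.map pvNorm) (line.length - ctr) hk).2
  have hc : (line.map pvNorm).length - (line.length - ctr) = ctr := by omega
  rw [hc] at hFB
  rw [← hFB (PySem.List.clampIdx line.length ((ctr : Int) + n))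
      (by rw [hlen]; exact PySem.List.clampIdx_le _ _)]
  exact pvClampCmp line.length _ _

theorem n_consecutive_word_spec : Claim_equal_n_consecutive_word := by
  intro line n _ _
  unfold Spec_n_consecutive_word
  have hnorm : (fun w : String => if w ∈ pvPunct then none else some (PySem.Str.lower w))
      = pvNorm := rfl
  have hfold := pvFold_spec (line.map pvNorm) line.length (by simp) line.length le_rfl
  have hmap : (List.range (line.length + 1)).map (fun j =>
      if line.length - line.length ≤ j then (pvFBN (line.map pvNorm) (line.length - j)).1
      else line.length + 1)
      = (List.range (line.length + 1)).map (fun j => (pvFBN (line.map pvNorm) (line.length - j)).1) :=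
    List.map_congr_left (fun j _ => if_pos (by omega))
  rw [hmap] at hfold
  have halt : n_consecutive_word_alt line n =
      ((List.range line.length).foldl (fun (out : List String) (i : Nat) =>
        if ((((List.range (line.length + 1)).map (fun j =>
              (pvFBN (line.map pvNorm) (line.length - j)).1)).getD i (line.length + 1) : Nat) : Int) <
            (if (line.length : Int) < (if 0 ≤ (i : Int) + n then (i : Int) + n
                else (line.length : Int) + ((i : Int) + n)) then (line.length : Int)
             else (if 0 ≤ (i : Int) + n then (i : Int) + n
                else (line.length : Int) + ((i : Int) + n)))
        then out ++ [line.getD i ""] else out) [])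
      ++ (PySem.List.pyGet? line (-1)).toList := by
    simp only [n_consecutive_word_alt, hnorm]
    rw [show (fun (st : List Nat × Nat) (k : Nat) =>
        let i := line.length - 1 - k
        let fb := st.1.set i (st.1.getD (i + 1) (line.length + 1))
        match (line.map pvNorm).getD i none with
        | none => (fb, st.2)
        | some v =>
            if st.2 < line.length ∧ (line.map pvNorm).getD st.2 none ≠ some v then
              (fb.set i (min st.2 (fb.getD i (line.length + 1))), i)
            else (fb, i)) = pvStepB (line.map pvNorm) line.length from rfl]
    rw [hfold]
  rw [halt]
  unfold n_consecutive_word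
  congr 1
  apply PySem.List.foldl_congr_mem
  intro acc ctr hctr
  simp only [List.mem_range] at hctr
  rw [PySem.List.getD_map_range _ _ _ _ (by omega)]
  rw [pvTakeOne line ctr hctr]
  by_cases hcnd : pvAllEqual (PySem.List.slice line (some (ctr : Int)) (some ((ctr : Int) + n))) = false
  · rw [if_pos hcnd, if_pos ((pvCond line n ctr hctr).mp hcnd)]
  · rw [if_neg hcnd, if_neg (fun hh => hcnd ((pvCond line n ctr hctr).mpr hh))]
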